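-- pv_equiv track=rewrite | github.com/yang-su2000/CP-Practice | 2022-10/828b.py | foo
-- ===== SOURCE A (Python) =====
-- def foo(n, q, ls, qs):
--     even = 0
--     odd = 0
--     s = sum(ls)
--     ans = []
--     for i in ls:
--         if i % 2:
--             odd += 1
--         else:
--             even += 1
--     for type, i in qs:
--         if type == 0:
--             s += even * i
--             if i % 2:
--                 odd, even = odd + even, 0
--             else:
--                 odd, even = odd, even
--         else:
--             s += odd * i
--             if i % 2:
--                 odd, even = 0, odd + even
--             else:
--                 odd, even = odd, even
--         ans.append(s)
--     return ans
-- ===== SOURCE B (Python) =====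
-- def foo(n, q, ls, qs):
--     arr = list(ls)
--     ans = []
--     for t, i in qs:
--         if t == 0:
--             for j in range(len(arr)):
--                 if arr[j] % 2 == 0:
--                     arr[j] += i
--         else:
--             for j in range(len(arr)):
--                 if arr[j] % 2 != 0:
--                     arr[j] += i
--         ans.append(sum(arr))
--     return ans
-- ===== Notes on version B (the rewrite author's own statement) =====
-- stated objective: simpler
-- what changed: B drops A's even/odd-count and running-sum bookkeeping and instead keeps a working copy of the list, directly adding i to every element of the matching current parity and summing the list after each query.
import Mathlib
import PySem

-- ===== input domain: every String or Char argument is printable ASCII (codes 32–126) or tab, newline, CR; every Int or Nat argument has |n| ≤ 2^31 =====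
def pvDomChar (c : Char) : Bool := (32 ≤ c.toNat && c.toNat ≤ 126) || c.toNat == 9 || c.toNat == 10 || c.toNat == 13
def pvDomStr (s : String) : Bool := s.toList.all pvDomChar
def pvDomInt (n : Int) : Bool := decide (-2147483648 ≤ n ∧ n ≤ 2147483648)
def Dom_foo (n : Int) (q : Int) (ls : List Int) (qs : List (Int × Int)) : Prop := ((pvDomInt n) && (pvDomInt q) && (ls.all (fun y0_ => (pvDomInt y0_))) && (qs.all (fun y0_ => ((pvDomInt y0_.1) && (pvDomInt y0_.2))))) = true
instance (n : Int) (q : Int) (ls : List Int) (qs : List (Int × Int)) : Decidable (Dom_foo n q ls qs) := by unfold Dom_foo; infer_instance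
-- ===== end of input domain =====

-- B replaces A's O(1) parity-count/running-sum bookkeeping with a direct working-copy
-- simulation (add i to every element of matching current parity, then sum); objective: simpler.

-- ===== PORT A =====
-- A's query loop: state (even, odd, s), emitting s after each query.
def fooLoopA (even odd s : Int) : List (Int × Int) → List Int
  | [] => []
  | (t, i) :: rest =>
    if t == 0 then
      let s' := s + even * i
      if i % 2 ≠ 0 then s' :: fooLoopA 0 (odd + even) s' rest
      else s' :: fooLoopA even odd s' rest
    else
      let s' := s + odd * i
      if i % 2 ≠ 0 then s' :: fooLoopA (odd + even) 0 s' rest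
      else s' :: fooLoopA even odd s' rest

def foo (n : Int) (q : Int) (ls : List Int) (qs : List (Int × Int)) : List Int :=
  let s := ls.sum
  -- first loop of A: count evens and odds
  let eo := ls.foldl (fun (p : Int × Int) i =>
    if i % 2 ≠ 0 then (p.1, p.2 + 1) else (p.1 + 1, p.2)) (0, 0)
  fooLoopA eo.1 eo.2 s qs

-- ===== PORT B =====
-- B's inner loops: add i to every element of the given current parity.
def addEven (i : Int) (arr : List Int) : List Int :=
  arr.map (fun x => if x % 2 == 0 then x + i else x)

def addOdd (i : Int) (arr : List Int) : List Int :=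
  arr.map (fun x => if x % 2 ≠ 0 then x + i else x)

-- B's query loop: working copy arr, update the matching parity, emit sum.
def fooLoopB (arr : List Int) : List (Int × Int) → List Int
  | [] => []
  | (t, i) :: rest =>
    let arr' := if t == 0 then addEven i arr else addOdd i arr
    arr'.sum :: fooLoopB arr' rest

def foo_alt (n : Int) (q : Int) (ls : List Int) (qs : List (Int × Int)) : List Int :=
  fooLoopB ls qs

-- ===== PRECONDITION & SPEC =====
def Spec_foo (n : Int) (q : Int) (ls : List Int) (qs : List (Int × Int)) (out : List Int) : Prop := out = foo_alt n q ls qs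
instance (n : Int) (q : Int) (ls : List Int) (qs : List (Int × Int)) (out : List Int) : Decidable (Spec_foo n q ls qs out) := by unfold Spec_foo; infer_instance

-- ===== CLAIM (what is proved, stated in full; the proofs are below) =====
def Claim_equal_foo : Prop := ∀ (n : Int) (q : Int) (ls : List Int) (qs : List (Int × Int)), Dom_foo n q ls qs → Spec_foo n q ls qs (foo n q ls qs)

-- ===== LEMMAS AND PROOFS =====

-- number of even / odd elements of a list, as Int
def ce : List Int → Int
  | [] => 0
  | x :: r => (if x % 2 = 0 then 1 else 0) + ce r

def co : List Int → Int
  | [] => 0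
  | x :: r => (if x % 2 ≠ 0 then 1 else 0) + co r

lemma sum_addEven (arr : List Int) (i : Int) :
    (addEven i arr).sum = arr.sum + ce arr * i := by
  induction arr with
  | nil => simp [addEven, ce]
  | cons x r ih =>
    simp only [addEven, List.map_cons, List.sum_cons] at ih ⊢
    by_cases h : x % 2 = 0
    · rw [if_pos (by simpa using h), ih]; simp only [ce]; rw [if_pos h]; ring
    · rw [if_neg (by simpa using h), ih]; simp only [ce]; rw [if_neg h]; ring

lemma sum_addOdd (arr : List Int) (i : Int) :
    (addOdd i arr).sum = arr.sum + co arr * i := by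
  induction arr with
  | nil => simp [addOdd, co]
  | cons x r ih =>
    simp only [addOdd, List.map_cons, List.sum_cons] at ih ⊢
    by_cases h : x % 2 = 0
    · rw [if_neg (by omega), ih]; simp only [co]; rw [if_neg (by omega)]; ring
    · rw [if_pos h, ih]; simp only [co]; rw [if_pos h]; ring

lemma counts_addEven_odd (arr : List Int) (i : Int) (hi : i % 2 ≠ 0) :
    ce (addEven i arr) = 0 ∧ co (addEven i arr) = co arr + ce arr := by
  induction arr with
  | nil => simp [addEven, ce, co]
  | cons x r ih =>
    simp only [addEven, List.map_cons] at ih ⊢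
    by_cases h : x % 2 = 0
    · rw [if_pos (by simpa using h)]
      have hx : ¬ (x + i) % 2 = 0 := by omega
      simp [ce, co, h, hx] at ih ⊢
      omega
    · rw [if_neg (by simpa using h)]
      simp [ce, co, h] at ih ⊢
      omega

lemma counts_addEven_even (arr : List Int) (i : Int) (hi : i % 2 = 0) :
    ce (addEven i arr) = ce arr ∧ co (addEven i arr) = co arr := by
  induction arr with
  | nil => simp [addEven, ce, co]
  | cons x r ih =>
    simp only [addEven, List.map_cons] at ih ⊢
    by_cases h : x % 2 = 0
    · rw [if_pos (by simpa using h)]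
      have hx : (x + i) % 2 = 0 := by omega
      simp [ce, co, h, hx] at ih ⊢
      omega
    · rw [if_neg (by simpa using h)]
      simp [ce, co, h] at ih ⊢
      omega

lemma counts_addOdd_odd (arr : List Int) (i : Int) (hi : i % 2 ≠ 0) :
    ce (addOdd i arr) = ce arr + co arr ∧ co (addOdd i arr) = 0 := by
  induction arr with
  | nil => simp [addOdd, ce, co]
  | cons x r ih =>
    simp only [addOdd, List.map_cons] at ih ⊢
    by_cases h : x % 2 = 0
    · rw [if_neg (show ¬ x % 2 ≠ 0 by omega)]
      simp [ce, co, h] at ih ⊢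
      omega
    · rw [if_pos h]
      have hx : (x + i) % 2 = 0 := by omega
      simp [ce, co, h, hx] at ih ⊢
      omega

lemma counts_addOdd_even (arr : List Int) (i : Int) (hi : i % 2 = 0) :
    ce (addOdd i arr) = ce arr ∧ co (addOdd i arr) = co arr := by
  induction arr with
  | nil => simp [addOdd, ce, co]
  | cons x r ih =>
    simp only [addOdd, List.map_cons] at ih ⊢
    by_cases h : x % 2 = 0
    · rw [if_neg (show ¬ x % 2 ≠ 0 by omega)]
      simp [ce, co, h] at ih ⊢
      omega
    · rw [if_pos h]
      have hx : ¬ (x + i) % 2 = 0 := by omega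
      simp [ce, co, h, hx] at ih ⊢
      omega

-- the loop invariant: A's state is exactly (ce arr, co arr, arr.sum)
lemma loop_eq (qs : List (Int × Int)) : ∀ arr : List Int,
    fooLoopA (ce arr) (co arr) arr.sum qs = fooLoopB arr qs := by
  induction qs with
  | nil => intro arr; simp [fooLoopA, fooLoopB]
  | cons tq rest ih =>
    intro arr
    obtain ⟨t, i⟩ := tq
    by_cases ht : t = 0
    · by_cases hi : i % 2 = 0
      · have hc := counts_addEven_even arr i hi
        simp only [fooLoopA, fooLoopB, ht, beq_self_eq_true, ite_true, hi, ne_eq,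
          not_true_eq_false, ite_false]
        rw [← ih (addEven i arr), hc.1, hc.2, sum_addEven]
      · have hc := counts_addEven_odd arr i hi
        simp only [fooLoopA, fooLoopB, ht, beq_self_eq_true, ite_true, hi, ne_eq,
          not_false_eq_true]
        rw [← ih (addEven i arr), hc.1, hc.2, sum_addEven]
    · by_cases hi : i % 2 = 0
      · have hc := counts_addOdd_even arr i hi
        simp only [fooLoopA, fooLoopB, beq_iff_eq, ht, ite_false, hi, ne_eq,
          not_true_eq_false]
        rw [← ih (addOdd i arr), hc.1, hc.2, sum_addOdd]
      · have hc := counts_addOdd_odd arr i hi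
        simp only [fooLoopA, fooLoopB, beq_iff_eq, ht, ite_false, hi, ne_eq,
          not_false_eq_true, ite_true]
        rw [← ih (addOdd i arr), hc.1, hc.2, sum_addOdd, add_comm (ce arr) (co arr)]

-- A's first counting loop computes (ce ls, co ls)
lemma count_fold (ls : List Int) : ∀ e o : Int,
    ls.foldl (fun (p : Int × Int) i =>
      if i % 2 ≠ 0 then (p.1, p.2 + 1) else (p.1 + 1, p.2)) (e, o) = (e + ce ls, o + co ls) := by
  induction ls with
  | nil => intro e o; simp [ce, co]
  | cons x r ih =>
    intro e o
    simp only [List.foldl_cons, ce, co]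
    by_cases h : x % 2 = 0
    · rw [if_neg (by omega), ih]
      simp [h, add_assoc]
    · rw [if_pos h, ih]
      simp [h, add_assoc]

-- ===== VERDICT (by name: the statement is the Claim_ definition above) =====
theorem foo_spec : Claim_equal_foo := by
  intro n q ls qs _
  show foo n q ls qs = foo_alt n q ls qs
  unfold foo foo_alt
  rw [count_fold ls 0 0]
  simpa using loop_eq qs ls
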